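-- pv_equiv track=rewrite | github.com/IT-coach-666/leetcode-public | leetcode_jy/jy_0001_0500/jy_0051_0100/jy_0065.py | isNumber_v3
-- ===== SOURCE A (Python) =====
-- def isNumber_v3(s: str) -> bool:
--     # jy: 去除字符串两边的空格 (后续遍历过程中不再允许出现空格)
--     s = s.strip()
--
--     # jy: 三个变量分别用于记录 "eE"、"." 和数字符号是否出现
--     e_show_up, dot_show_up, num_show_up = False, False, False
--
--     for i in range(len(s)):
--         c = s[i]
--         # jy: 数字符号出现
--         if "0" <= c <= "9":
--             num_show_up = True
--         # jy: 如果当前字符为 "-+", 且不是第一个字符, 同时前一个字符不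
--         #     为 "eE", 则不符合要求
--         elif c in ('+', '-'):
--             if i > 0 and s[i-1] not in ["e", "E"]:
--                 return False
--         # jy: 如果当前字符为 ".", 且不是第一次出现, 或者是第一次出现, 但
--         #     是在 "eE" 之后出现, 则直接返回 False
--         elif c == '.':
--             if dot_show_up or e_show_up:
--                 return False
--             dot_show_up = True
--         # jy: 如果当前字符为 "eE", 且不是第一次出现, 或之前还没有数值出现,
--         #     则直接返回 Fasle; 否则重置 num_show_up 为 False, 表明后续还
--         #     需要出现数值才符合规范
--         elif c in ["e", "E"]:
--             if e_show_up or not num_show_up: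
--                 return False
--             e_show_up = True
--             num_show_up = False
--         else:
--             return False
--
--     return num_show_up
-- ===== SOURCE B (Python) =====
-- def _split_first_e(t):
--     # first 'e'/'E' splits the string into (mantissa, exponent); None if absent
--     for i, c in enumerate(t):
--         if c in 'eE':
--             return t[:i], t[i + 1:]
--     return None
--
--
-- def _mantissa(t):
--     if t[:1] in ('+', '-'):
--         t = t[1:]
--     seen_dot = seen_digit = False
--     for c in t:
--         if c.isdigit():
--             seen_digit = True
--         elif c == '.' and not seen_dot:
--             seen_dot = True
--         else:
--             return False
--     return seen_digit
--
--
-- def _exponent(t):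
--     if t[:1] in ('+', '-'):
--         t = t[1:]
--     return t != '' and all(c.isdigit() for c in t)
--
--
-- def isNumber_v3(s: str) -> bool:
--     s = s.strip()
--     parts = _split_first_e(s)
--     if parts is None:
--         return _mantissa(s)
--     return _mantissa(parts[0]) and _exponent(parts[1])
-- ===== Notes on version B (the rewrite author's own statement) =====
-- stated objective: simpler
-- what changed: A's single five-variable state machine (exponent/dot/digit flags plus a look-back at the previous character for sign placement) is replaced by splitting the stripped string at the first exponent marker and validating the mantissa part and the exponent part independently with two small helpers.
import Mathlib
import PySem

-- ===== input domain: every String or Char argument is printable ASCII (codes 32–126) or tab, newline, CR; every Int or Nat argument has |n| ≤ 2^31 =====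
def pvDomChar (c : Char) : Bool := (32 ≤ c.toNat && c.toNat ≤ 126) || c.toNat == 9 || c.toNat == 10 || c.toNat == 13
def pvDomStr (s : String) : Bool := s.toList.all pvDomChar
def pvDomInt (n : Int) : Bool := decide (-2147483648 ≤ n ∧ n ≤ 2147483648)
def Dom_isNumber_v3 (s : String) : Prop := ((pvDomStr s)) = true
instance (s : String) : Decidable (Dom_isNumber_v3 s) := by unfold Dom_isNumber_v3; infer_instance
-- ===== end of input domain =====

-- B replaces A's single five-variable state machine by a split at the first 'e'/'E'
-- with two small part validators (mantissa / exponent); objective: simpler decomposition, same cost.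

-- ===== PORT A =====
-- A's loop reads s[i] and s[i-1]; the recursion carries the previous character as `prev`.
def pvLoopA : List Char → Option Char → Bool → Bool → Bool → Bool
  | [], _, _, _, numShow => numShow
  | c :: rest, prev, eShow, dotShow, numShow =>
    if '0' ≤ c ∧ c ≤ '9' then
      pvLoopA rest (some c) eShow dotShow true
    else if c = '+' ∨ c = '-' then
      match prev with
      | some p => if p ≠ 'e' ∧ p ≠ 'E' then false else pvLoopA rest (some c) eShow dotShow numShow
      | none => pvLoopA rest (some c) eShow dotShow numShow
    else if c = '.' then
      if dotShow ∨ eShow then false else pvLoopA rest (some c) eShow true numShow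
    else if c = 'e' ∨ c = 'E' then
      if eShow ∨ numShow = false then false else pvLoopA rest (some c) true dotShow false
    else false

def isNumber_v3 (s : String) : Bool :=
  pvLoopA (PySem.Str.strip s).toList none false false false

-- ===== PORT B =====
-- Source B's _split_first_e: (prefix before the first 'e'/'E', suffix after it), none if absent.
def pvSplitFirstE : List Char → Option (List Char × List Char)
  | [] => none
  | c :: rest =>
    if c = 'e' ∨ c = 'E' then some ([], rest)
    else
      match pvSplitFirstE rest with
      | some (m, ex) => some (c :: m, ex)
      | none => none

-- Source B's `if t[:1] in ('+','-'): t = t[1:]`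
def pvStripSign : List Char → List Char
  | c :: rest => if c = '+' ∨ c = '-' then rest else c :: rest
  | [] => []

-- Source B's _mantissa loop over (seen_dot, seen_digit)
def pvMantLoop : List Char → Bool → Bool → Bool
  | [], _, seenDigit => seenDigit
  | c :: rest, seenDot, seenDigit =>
    if PySem.Chars.isdigit c then pvMantLoop rest seenDot true
    else if c = '.' ∧ seenDot = false then pvMantLoop rest true seenDigit
    else false

def pvMantissa (t : List Char) : Bool := pvMantLoop (pvStripSign t) false false

def pvExponent (t : List Char) : Bool :=
  let u := pvStripSign t
  !u.isEmpty && u.all PySem.Chars.isdigit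

def isNumber_v3_alt (s : String) : Bool :=
  let l := (PySem.Str.strip s).toList
  match pvSplitFirstE l with
  | none => pvMantissa l
  | some (m, ex) => pvMantissa m && pvExponent ex

-- ===== PRECONDITION & SPEC =====
def Spec_isNumber_v3 (s : String) (out : Bool) : Prop := out = isNumber_v3_alt s
instance (s : String) (out : Bool) : Decidable (Spec_isNumber_v3 s out) := by unfold Spec_isNumber_v3; infer_instance

-- ===== CLAIM (what is proved, stated in full; the proofs are below) =====
def Claim_equal_isNumber_v3 : Prop := ∀ (s : String), Dom_isNumber_v3 s → Spec_isNumber_v3 s (isNumber_v3 s)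

-- ===== LEMMAS AND PROOFS =====

-- proof-only: A's behaviour after the first character of the mantissa (eShow = false, prev ∉ {e,E,start})
def pvMid : List Char → Bool → Bool → Bool
  | [], _, n => n
  | c :: r, d, n =>
    if PySem.Chars.isdigit c then pvMid r d true
    else if c = '.' then (if d then false else pvMid r true n)
    else if c = 'e' ∨ c = 'E' then (if n then pvExponent r else false)
    else false

lemma pv_digit_ne_e {c : Char} (h : '0' ≤ c ∧ c ≤ '9') : c ≠ 'e' ∧ c ≠ 'E' := by
  constructor <;> rintro rfl <;> revert h <;> decide

lemma pv_not_digit {c : Char} (hc : ¬('0' ≤ c ∧ c ≤ '9')) : PySem.Chars.isdigit c = false := by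
  simp [PySem.Chars.isdigit]
  exact fun h1 => not_le.mp fun h2 => hc ⟨h1, h2⟩

-- exponent tail: once past a non-(e/E) character with eShow = true, only digits may follow
lemma pvLoopA_exp_tail (l : List Char) : ∀ (p : Char) (d n : Bool), p ≠ 'e' → p ≠ 'E' →
    pvLoopA l (some p) true d n = (if l.isEmpty then n else l.all PySem.Chars.isdigit) := by
  induction l with
  | nil => intros; simp [pvLoopA]
  | cons c r ih =>
    intro p d n hpe hpE
    by_cases hc : '0' ≤ c ∧ c ≤ '9'
    · have hne := pv_digit_ne_e hc
      rw [pvLoopA, if_pos hc, ih c d true hne.1 hne.2]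
      cases r <;> simp [PySem.Chars.isdigit, hc.1, hc.2]
    · rw [pvLoopA, if_neg hc]
      have hdig : PySem.Chars.isdigit c = false := pv_not_digit hc
      by_cases hs : c = '+' ∨ c = '-'
      · rw [if_pos hs]
        have : (p ≠ 'e' ∧ p ≠ 'E') := ⟨hpe, hpE⟩
        simp only [if_pos this, List.isEmpty_cons, List.all_cons, hdig,
          Bool.false_and, if_neg (by simp : ¬(false = true))]
      · rw [if_neg hs]
        by_cases hdot : c = '.'
        · subst hdot; simp [List.all_cons, (by decide : PySem.Chars.isdigit '.' = false)]
        · rw [if_neg hdot]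
          by_cases he : c = 'e' ∨ c = 'E'
          · rw [if_pos he]; simp [List.all_cons, hdig]
          · rw [if_neg he]; simp [List.all_cons, hdig]

-- exponent phase entered right after the 'e'/'E': it is exactly Source B's _exponent
lemma pvLoopA_exp (l : List Char) (p : Char) (d : Bool) (hp : p = 'e' ∨ p = 'E') :
    pvLoopA l (some p) true d false = pvExponent l := by
  cases l with
  | nil =>
    simp [pvLoopA, pvExponent, pvStripSign]
  | cons c r =>
    by_cases hc : '0' ≤ c ∧ c ≤ '9'
    · have hne := pv_digit_ne_e hc
      rw [pvLoopA, if_pos hc, pvLoopA_exp_tail r c d true hne.1 hne.2]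
      have hcs : ¬(c = '+' ∨ c = '-') := by rintro (rfl | rfl) <;> revert hc <;> decide
      cases r <;>
        simp [pvExponent, pvStripSign, if_neg hcs, List.all_cons, PySem.Chars.isdigit, hc.1, hc.2]
    · have hdig : PySem.Chars.isdigit c = false := pv_not_digit hc
      rw [pvLoopA, if_neg hc]
      by_cases hs : c = '+' ∨ c = '-'
      · rw [if_pos hs]
        have hpp : ¬(p ≠ 'e' ∧ p ≠ 'E') := by rcases hp with rfl | rfl <;> simp
        have hce : c ≠ 'e' ∧ c ≠ 'E' := by rcases hs with rfl | rfl <;> exact ⟨by decide, by decide⟩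
        rw [if_neg hpp, pvLoopA_exp_tail r c d false hce.1 hce.2]
        cases r <;> simp [pvExponent, pvStripSign, if_pos hs]
      · rw [if_neg hs]
        by_cases hdot : c = '.'
        · subst hdot
          simp [pvExponent, pvStripSign, List.all_cons,
            (by decide : PySem.Chars.isdigit '.' = false)]
        · rw [if_neg hdot]
          by_cases he : c = 'e' ∨ c = 'E'
          · rw [if_pos he]; simp [pvExponent, pvStripSign, if_neg hs, List.all_cons, hdig]
          · rw [if_neg he]; simp [pvExponent, pvStripSign, if_neg hs, List.all_cons, hdig]

-- mantissa phase after the first character: A's scan equals pvMid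
lemma pvLoopA_mid (l : List Char) : ∀ (p : Char) (d n : Bool), p ≠ 'e' → p ≠ 'E' →
    pvLoopA l (some p) false d n = pvMid l d n := by
  induction l with
  | nil => intros; simp [pvLoopA, pvMid]
  | cons c r ih =>
    intro p d n hpe hpE
    by_cases hc : '0' ≤ c ∧ c ≤ '9'
    · have hne := pv_digit_ne_e hc
      have hdig : PySem.Chars.isdigit c = true := by
        simp [PySem.Chars.isdigit, hc.1, hc.2]
      rw [pvLoopA, if_pos hc, ih c d true hne.1 hne.2, pvMid, if_pos hdig]
    · have hdig : PySem.Chars.isdigit c = false := pv_not_digit hc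
      rw [pvLoopA, if_neg hc, pvMid, if_neg (by simp [hdig] : ¬ PySem.Chars.isdigit c = true)]
      by_cases hs : c = '+' ∨ c = '-'
      · have hdot : c ≠ '.' := by rcases hs with rfl | rfl <;> decide
        have he : ¬(c = 'e' ∨ c = 'E') := by rintro (rfl | rfl) <;> revert hs <;> decide
        rw [if_pos hs, if_neg hdot, if_neg he, if_pos ⟨hpe, hpE⟩]
      · rw [if_neg hs]
        by_cases hdot : c = '.'
        · rw [if_pos hdot, if_pos hdot]
          cases d with
          | false =>
            have : ¬(false = true ∨ False) := by simp
            rw [if_neg (by simp : ¬(false = true ∨ (false : Bool) = true)), if_neg (by simp : ¬(false = true))]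
            rw [hdot]
            exact ih '.' true n (by decide) (by decide)
          | true => simp
        · rw [if_neg hdot, if_neg hdot]
          by_cases he : c = 'e' ∨ c = 'E'
          · rw [if_pos he, if_pos he]
            cases n with
            | false => simp
            | true =>
              rw [if_neg (by simp : ¬((false : Bool) = true ∨ (true : Bool) = false)),
                  if_pos rfl]
              exact pvLoopA_exp r c d he
          · rw [if_neg he, if_neg he]

-- pvMid is exactly: validate up to the first 'e'/'E' with pvMantLoop, the rest with pvExponent
lemma pvMid_split (l : List Char) : ∀ (d n : Bool),
    pvMid l d n = (match pvSplitFirstE l with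
      | none => pvMantLoop l d n
      | some (m, ex) => pvMantLoop m d n && pvExponent ex) := by
  induction l with
  | nil => intros; simp [pvMid, pvSplitFirstE, pvMantLoop]
  | cons c r ih =>
    intro d n
    by_cases he : c = 'e' ∨ c = 'E'
    · have hdig : PySem.Chars.isdigit c = false := by rcases he with rfl | rfl <;> decide
      have hdot : c ≠ '.' := by rcases he with rfl | rfl <;> decide
      rw [pvMid, if_neg (by simp [hdig]), if_neg hdot, if_pos he,
          pvSplitFirstE, if_pos he]
      cases n <;> simp [pvMantLoop]
    · rw [pvSplitFirstE, if_neg he, pvMid]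
      by_cases hdig : PySem.Chars.isdigit c = true
      · rw [if_pos hdig, ih d true]
        cases hsp : pvSplitFirstE r with
        | none => simp [pvMantLoop, hdig]
        | some p => cases p with
          | mk m ex => simp [pvMantLoop, hdig]
      · rw [if_neg hdig]
        by_cases hdot : c = '.'
        · subst hdot
          cases d with
          | false =>
            rw [if_pos rfl, if_neg (by simp : ¬(false = true)), ih true n]
            cases hsp : pvSplitFirstE r with
            | none => simp [pvMantLoop, hdig]
            | some p => cases p with
              | mk m ex => simp [pvMantLoop, hdig]
          | true =>
            rw [if_pos rfl, if_pos rfl]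
            cases hsp : pvSplitFirstE r with
            | none => simp [pvMantLoop, hdig]
            | some p => cases p with
              | mk m ex => simp [pvMantLoop, hdig]
        · rw [if_neg hdot, if_neg he]
          cases hsp : pvSplitFirstE r with
          | none => simp [pvMantLoop, hdig, hdot]
          | some p => cases p with
            | mk m ex => simp [pvMantLoop, hdig, hdot]

-- the whole scan, from the start
lemma pvLoopA_top (l : List Char) :
    pvLoopA l none false false false = (match pvSplitFirstE l with
      | none => pvMantissa l
      | some (m, ex) => pvMantissa m && pvExponent ex) := by
  cases l with
  | nil => simp [pvLoopA, pvSplitFirstE, pvMantissa, pvMantLoop, pvStripSign]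
  | cons c r =>
    by_cases hc : '0' ≤ c ∧ c ≤ '9'
    · have hne := pv_digit_ne_e hc
      have hdig : PySem.Chars.isdigit c = true := by
        simp [PySem.Chars.isdigit, hc.1, hc.2]
      have hcs : ¬(c = '+' ∨ c = '-') := by rintro (rfl | rfl) <;> revert hc <;> decide
      rw [pvLoopA, if_pos hc, pvLoopA_mid r c false true hne.1 hne.2, pvMid_split r false true,
          pvSplitFirstE, if_neg (by rintro (rfl | rfl) <;> revert hc <;> decide)]
      cases hsp : pvSplitFirstE r with
      | none => simp [pvMantissa, pvStripSign, if_neg hcs, pvMantLoop, hdig]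
      | some p => cases p with
        | mk m ex => simp [pvMantissa, pvStripSign, if_neg hcs, pvMantLoop, hdig]
    · have hdig : PySem.Chars.isdigit c = false := pv_not_digit hc
      rw [pvLoopA, if_neg hc]
      by_cases hs : c = '+' ∨ c = '-'
      · have hce : c ≠ 'e' ∧ c ≠ 'E' := by rcases hs with rfl | rfl <;> exact ⟨by decide, by decide⟩
        rw [if_pos hs, pvLoopA_mid r c false false hce.1 hce.2, pvMid_split r false false,
            pvSplitFirstE, if_neg (by rintro (rfl | rfl) <;> revert hs <;> decide)]
        cases hsp : pvSplitFirstE r with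
        | none => simp [pvMantissa, pvStripSign, if_pos hs]
        | some p => cases p with
          | mk m ex => simp [pvMantissa, pvStripSign, if_pos hs]
      · rw [if_neg hs]
        by_cases hdot : c = '.'
        · subst hdot
          rw [if_pos rfl, if_neg (by simp : ¬((false : Bool) = true ∨ (false : Bool) = true)),
              pvLoopA_mid r '.' true false (by decide) (by decide), pvMid_split r true false,
              pvSplitFirstE, if_neg (by decide)]
          cases hsp : pvSplitFirstE r with
          | none =>
            simp [pvMantissa, pvStripSign, pvMantLoop,
              (by decide : PySem.Chars.isdigit '.' = false)]
          | some p => cases p with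
            | mk m ex =>
              simp [pvMantissa, pvStripSign, pvMantLoop,
                (by decide : PySem.Chars.isdigit '.' = false)]
        · rw [if_neg hdot]
          by_cases he : c = 'e' ∨ c = 'E'
          · rw [if_pos he, if_pos (by simp : (false : Bool) = true ∨ (false : Bool) = false),
                pvSplitFirstE, if_pos he]
            simp [pvMantissa, pvStripSign, pvMantLoop]
          · rw [if_neg he, pvSplitFirstE, if_neg he]
            cases hsp : pvSplitFirstE r with
            | none => simp [pvMantissa, pvStripSign, if_neg hs, pvMantLoop, hdig, hdot]
            | some p => cases p with
              | mk m ex => simp [pvMantissa, pvStripSign, if_neg hs, pvMantLoop, hdig, hdot]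

-- ===== VERDICT (by name: the statement is the Claim_ definition above) =====
theorem isNumber_v3_spec : Claim_equal_isNumber_v3 := by
  intro s _
  unfold Spec_isNumber_v3 isNumber_v3 isNumber_v3_alt
  exact pvLoopA_top (PySem.Str.strip s).toList
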